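-- pv_equiv track=rewrite | github.com/zoul0813/zeal-dev-environment | home/zde/cmds/deps.py | _lookup_dep
-- ===== SOURCE A (Python) =====
-- def _repo_name_from_id(dep_id: str) -> str:
--     if "/" in dep_id:
--         return dep_id.split("/", 1)[1]
--     return dep_id
--
-- def _lookup_dep(dep_map: dict[str, dict], raw_id: str) -> tuple[str, dict] | None:
--     if raw_id in dep_map:
--         return raw_id, dep_map[raw_id]
--
--     wanted = raw_id.casefold()
--     matches: list[tuple[str, dict]] = []
--     for dep_id, dep in dep_map.items():
--         if dep_id.casefold() == wanted:
--             matches.append((dep_id, dep))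
--         for alias in dep.get("aliases", []):
--             if alias.casefold() == wanted:
--                 matches.append((dep_id, dep))
--         if _repo_name_from_id(dep_id).casefold() == wanted:
--             matches.append((dep_id, dep))
--
--     # Deduplicate by canonical dependency ID.
--     by_id: dict[str, dict] = {}
--     for dep_id, dep in matches:
--         by_id[dep_id] = dep
--
--     if len(by_id) == 0:
--         return None
--     if len(by_id) > 1:
--         choices = ", ".join(sorted(by_id.keys()))
--         raise RuntimeError(f"Ambiguous dependency identifier '{raw_id}'. Matches: {choices}")
--     dep_id, dep = next(iter(by_id.items()))
--     return dep_id, dep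
-- ===== SOURCE B (Python) =====
-- def _repo_name_from_id(dep_id: str) -> str:
--     if "/" in dep_id:
--         return dep_id.split("/", 1)[1]
--     return dep_id
--
-- def _tokens(dep_id: str, dep: dict) -> list[str]:
--     toks = [dep_id.casefold()]
--     for alias in dep.get("aliases", []):
--         toks.append(alias.casefold())
--     toks.append(_repo_name_from_id(dep_id).casefold())
--     return toks
--
-- def _lookup_dep(dep_map: dict[str, dict], raw_id: str) -> tuple[str, dict] | None:
--     if raw_id in dep_map:
--         return raw_id, dep_map[raw_id]
--
--     wanted = raw_id.casefold()
--     # One pass: build a token -> {canonical ids} index, then a single lookup.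
--     index: dict[str, set[str]] = {}
--     for dep_id, dep in dep_map.items():
--         for tok in _tokens(dep_id, dep):
--             index.setdefault(tok, set()).add(dep_id)
--
--     ids = index.get(wanted, set())
--     if not ids:
--         return None
--     if len(ids) > 1:
--         choices = ", ".join(sorted(ids))
--         raise RuntimeError(f"Ambiguous dependency identifier '{raw_id}'. Matches: {choices}")
--     (dep_id,) = ids
--     return dep_id, dep_map[dep_id]
-- ===== Notes on version B (the rewrite author's own statement) =====
-- stated objective: alternative
-- what changed: Replaces the collect-matches-list-then-dedup-by-dict shape with a one-pass token->set-of-canonical-ids index (built from id, aliases and repo name) followed by a single lookup of the casefolded identifier; the case-sensitive fast path is kept. Pre_ excludes ambiguous identifiers (both raise RuntimeError there) and association lists with duplicate keys, which do not encode a Python dict.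
import Mathlib
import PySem

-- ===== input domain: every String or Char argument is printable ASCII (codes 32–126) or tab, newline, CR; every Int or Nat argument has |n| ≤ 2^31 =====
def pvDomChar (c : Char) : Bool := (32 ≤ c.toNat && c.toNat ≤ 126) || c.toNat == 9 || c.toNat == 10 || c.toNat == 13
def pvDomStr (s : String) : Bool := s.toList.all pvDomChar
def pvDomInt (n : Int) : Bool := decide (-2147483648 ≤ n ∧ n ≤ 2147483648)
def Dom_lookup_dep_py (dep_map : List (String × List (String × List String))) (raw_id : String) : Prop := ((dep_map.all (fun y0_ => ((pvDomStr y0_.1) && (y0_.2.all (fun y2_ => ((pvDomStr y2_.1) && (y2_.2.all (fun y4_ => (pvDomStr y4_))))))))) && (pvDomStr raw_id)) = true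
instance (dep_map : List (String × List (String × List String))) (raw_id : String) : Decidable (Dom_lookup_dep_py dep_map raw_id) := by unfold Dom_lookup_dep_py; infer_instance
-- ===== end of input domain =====

-- B replaces A's collect-matches-then-dedup-by-dict shape with a one-pass token→{canonical id} index
-- and a single lookup of the casefolded identifier (casefold = lower on the ASCII domain).

-- ===== PORT A =====
-- _repo_name_from_id
def repo_name_py (dep_id : String) : String :=
  if PySem.Str.isIn "/" dep_id then
    match PySem.Str.splitMax? dep_id "/" 1 with
    | some (_ :: r :: _) => r
    | _ => dep_id  -- unreachable: "/" occurs in dep_id, so split has ≥ 2 parts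
  else dep_id

def lookup_dep_py (dep_map : List (String × List (String × List String))) (raw_id : String) : Option (String × (List (String × List String))) :=
  let dm := PySem.Dict.mk dep_map
  if dm.contains raw_id then
    match dm.get? raw_id with
    | some dep => some (raw_id, dep)
    | none => none  -- unreachable: contains is true
  else
    let wanted := PySem.Str.lower raw_id
    let mtchs := dep_map.foldl (fun acc e =>
      let acc := if PySem.Str.lower e.1 == wanted then acc ++ [e] else acc
      let acc := (PySem.Dict.getD (PySem.Dict.mk e.2) "aliases" []).foldl
          (fun a al => if PySem.Str.lower al == wanted then a ++ [e] else a) acc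
      if PySem.Str.lower (repo_name_py e.1) == wanted then acc ++ [e] else acc) []
    let by_id := mtchs.foldl (fun d e => PySem.Dict.insert d e.1 e.2)
        (PySem.Dict.empty : PySem.Dict String (List (String × List String)))
    if by_id.size == 0 then none
    else if by_id.size > 1 then none  -- RuntimeError "Ambiguous dependency identifier": excluded by Pre_
    else
      match by_id.items with  -- dep_id, dep = next(iter(by_id.items()))
      | (i, d) :: _ => some (i, d)
      | [] => none  -- unreachable: by_id.size = 1

-- ===== PORT B =====
-- _repo_name_from_id (B's own copy of the same-module helper)
def repo_name_alt_py (dep_id : String) : String :=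
  if PySem.Str.isIn "/" dep_id then
    match PySem.Str.splitMax? dep_id "/" 1 with
    | some (_ :: r :: _) => r
    | _ => dep_id  -- unreachable: "/" occurs in dep_id, so split has ≥ 2 parts
  else dep_id

-- _tokens
def tokens_py (e : String × List (String × List String)) : List String :=
  let toks := [PySem.Str.lower e.1]
  let toks := (PySem.Dict.getD (PySem.Dict.mk e.2) "aliases" []).foldl
      (fun ts al => ts ++ [PySem.Str.lower al]) toks
  toks ++ [PySem.Str.lower (repo_name_alt_py e.1)]

def lookup_dep_py_alt (dep_map : List (String × List (String × List String))) (raw_id : String) : Option (String × (List (String × List String))) :=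
  let dm := PySem.Dict.mk dep_map
  if dm.contains raw_id then
    match dm.get? raw_id with
    | some dep => some (raw_id, dep)
    | none => none  -- unreachable: contains is true
  else
    let wanted := PySem.Str.lower raw_id
    let index := dep_map.foldl (fun idx e =>
        (tokens_py e).foldl
          (fun ix t => PySem.Dict.modify ix t [] (fun s => PySem.Set.add s e.1)) idx)
      (PySem.Dict.empty : PySem.Dict String (PySem.Set String))
    let ids := PySem.Dict.getD index wanted []
    if ids.isEmpty then none
    else if ids.length > 1 then none  -- RuntimeError "Ambiguous dependency identifier": excluded by Pre_
    else
      match ids with  -- (dep_id,) = ids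
      | [i] =>
        match dm.get? i with
        | some dep => some (i, dep)
        | none => none  -- unreachable: i is a key of dep_map (KeyError cannot fire)
      | _ => none  -- unreachable: ids has exactly one element

-- ===== PRECONDITION & SPEC =====
-- the same repo-name computation, restated for the precondition (so Pre_ shares no code with the ports)
def pre_repo_name (dep_id : String) : String :=
  if PySem.Str.isIn "/" dep_id then
    match PySem.Str.splitMax? dep_id "/" 1 with
    | some (_ :: r :: _) => r
    | _ => dep_id
  else dep_id

def match_cond (wanted : String) (e : String × List (String × List String)) : Bool :=
  PySem.Str.lower e.1 == wanted
  || (PySem.Dict.getD (PySem.Dict.mk e.2) "aliases" []).any (fun al => PySem.Str.lower al == wanted)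
  || PySem.Str.lower (pre_repo_name e.1) == wanted

def match_keys (dep_map : List (String × List (String × List String))) (raw_id : String) : List String :=
  (dep_map.filter (match_cond (PySem.Str.lower raw_id))).map (·.1)

-- Pre_ excludes (a) association lists with duplicate keys, which do not encode a Python dict
-- (A's argument is dict[str, dict]), and (b) ambiguous identifiers — not an exact key and with
-- two or more dependencies matching case-insensitively — on which A raises RuntimeError.
def Pre_lookup_dep_py (dep_map : List (String × List (String × List String))) (raw_id : String) : Prop :=
  (dep_map.map (·.1)).Nodup ∧
  (raw_id ∈ dep_map.map (·.1) ∨ (match_keys dep_map raw_id).length ≤ 1)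
instance (dep_map : List (String × List (String × List String))) (raw_id : String) : Decidable (Pre_lookup_dep_py dep_map raw_id) := by unfold Pre_lookup_dep_py; infer_instance

def pvWitness_lookup_dep_py : (List (String × List (String × List String))) × String :=
  ([("Zeal/Core", [("aliases", ["zc"])]), ("lib", [])], "CORE")

def Spec_lookup_dep_py (dep_map : List (String × List (String × List String))) (raw_id : String) (out : Option (String × (List (String × List String)))) : Prop := out = lookup_dep_py_alt dep_map raw_id
instance (dep_map : List (String × List (String × List String))) (raw_id : String) (out : Option (String × (List (String × List String)))) : Decidable (Spec_lookup_dep_py dep_map raw_id out) := by unfold Spec_lookup_dep_py; infer_instance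

-- ===== CLAIM (what is proved, stated in full; the proofs are below) =====
def Claim_equal_lookup_dep_py : Prop := ∀ (dep_map : List (String × List (String × List String))) (raw_id : String), Dom_lookup_dep_py dep_map raw_id → Pre_lookup_dep_py dep_map raw_id → Spec_lookup_dep_py dep_map raw_id (lookup_dep_py dep_map raw_id)

-- ===== LEMMAS AND PROOFS =====

theorem pvWitness_ok : Dom_lookup_dep_py pvWitness_lookup_dep_py.1 pvWitness_lookup_dep_py.2 ∧ Pre_lookup_dep_py pvWitness_lookup_dep_py.1 pvWitness_lookup_dep_py.2 := by
  constructor <;> decide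

-- per-entry match list of A's collecting loop
def emsA (wanted : String) (e : String × List (String × List String)) : List (String × List (String × List String)) :=
  (if PySem.Str.lower e.1 == wanted then [e] else [])
  ++ ((PySem.Dict.getD (PySem.Dict.mk e.2) "aliases" []).filter (fun al => PySem.Str.lower al == wanted)).map (fun _ => e)
  ++ (if PySem.Str.lower (repo_name_py e.1) == wanted then [e] else [])

theorem emsA_mem {wanted : String} {e x : String × List (String × List String)} (h : x ∈ emsA wanted e) : x = e := by
  unfold emsA at h
  rcases List.mem_append.1 h with h | h
  · rcases List.mem_append.1 h with h | h
    · split at h <;> simp_all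
    · rcases List.mem_map.1 h with ⟨a, _, rfl⟩
      rfl
  · split at h <;> simp_all

theorem emsA_nil_iff (wanted : String) (e : String × List (String × List String)) :
    emsA wanted e = [] ↔ match_cond wanted e = false := by
  unfold emsA match_cond
  simp only [show pre_repo_name = repo_name_py from rfl]
  cases h1 : (PySem.Str.lower e.1 == wanted) <;>
    cases h3 : (PySem.Str.lower (repo_name_py e.1) == wanted) <;>
      simp [List.filter_eq_nil_iff, List.any_eq_false]

theorem matchesA_eq (wanted : String) (l acc : List (String × List (String × List String))) :
    l.foldl (fun acc e =>
      let acc := if PySem.Str.lower e.1 == wanted then acc ++ [e] else acc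
      let acc := (PySem.Dict.getD (PySem.Dict.mk e.2) "aliases" []).foldl
          (fun a al => if PySem.Str.lower al == wanted then a ++ [e] else a) acc
      if PySem.Str.lower (repo_name_py e.1) == wanted then acc ++ [e] else acc) acc
    = acc ++ l.flatMap (emsA wanted) := by
  induction l generalizing acc with
  | nil => simp
  | cons e l ih =>
    simp only [List.foldl_cons, List.flatMap_cons, ih]
    rw [PySem.List.foldl_append_if]
    unfold emsA
    split <;> split <;> simp [List.append_assoc]

theorem foldl_ins_const {e : String × List (String × List String)}
    (es : List (String × List (String × List String))) (hall : ∀ x ∈ es, x = e)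
    (d : PySem.Dict String (List (String × List String))) :
    es.foldl (fun d e => PySem.Dict.insert d e.1 e.2) d
      = if es.isEmpty then d else PySem.Dict.insert d e.1 e.2 := by
  induction es generalizing d with
  | nil => simp
  | cons x es ih =>
    have hx : x = e := hall x (by simp)
    subst hx
    rw [List.foldl_cons, ih (fun y hy => hall y (by simp [hy]))]
    cases es <;> simp [PySem.Dict.insert_insert_self]

theorem byid_items (wanted : String) (l : List (String × List (String × List String)))
    (d : PySem.Dict String (List (String × List String)))
    (hnd : (l.map (·.1)).Nodup) (hfresh : ∀ e ∈ l, d.contains e.1 = false) :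
    ((l.flatMap (emsA wanted)).foldl (fun d e => PySem.Dict.insert d e.1 e.2) d).items
      = d.items ++ l.filter (match_cond wanted) := by
  induction l generalizing d with
  | nil => simp
  | cons e l ih =>
    simp only [List.flatMap_cons, List.foldl_append, List.map_cons] at *
    rw [foldl_ins_const (emsA wanted e) (fun x hx => emsA_mem hx) d]
    rcases hc : match_cond wanted e with _ | _
    · have hnil : emsA wanted e = [] := (emsA_nil_iff wanted e).2 hc
      rw [hnil]
      simp only [List.isEmpty_nil, if_true]
      rw [ih d (List.nodup_cons.1 hnd).2 (fun x hx => hfresh x (List.mem_cons_of_mem _ hx))]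
      simp [hc]
    · have hnil : emsA wanted e ≠ [] := by
        intro h
        rw [(emsA_nil_iff wanted e).1 h] at hc
        cases hc
      rw [if_neg (by simpa [List.isEmpty_iff] using hnil)]
      have hfresh' : ∀ x ∈ l, (PySem.Dict.insert d e.1 e.2).contains x.1 = false := by
        intro x hx
        rw [PySem.Dict.contains_insert]
        have hxne : x.1 ≠ e.1 := by
          intro hEq
          exact (List.nodup_cons.1 hnd).1 (hEq ▸ List.mem_map_of_mem hx)
        simp [hxne, hfresh x (List.mem_cons_of_mem _ hx)]
      rw [ih _ (List.nodup_cons.1 hnd).2 hfresh']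
      rw [PySem.Dict.items_insert_of_not_contains _ _ (hfresh e List.mem_cons_self)]
      simp [hc]

theorem tokfold_getD (w cid : String) (ts : List String) (ix : PySem.Dict String (PySem.Set String)) :
    (ts.foldl (fun ix t => PySem.Dict.modify ix t [] (fun s => PySem.Set.add s cid)) ix).getD w []
      = if w ∈ ts then PySem.Set.add (ix.getD w []) cid else ix.getD w [] := by
  induction ts generalizing ix with
  | nil => simp
  | cons t ts ih =>
    rw [List.foldl_cons, ih]
    by_cases hw : w = t
    · subst hw
      simp
    · simp [PySem.Dict.getD_modify, hw]

theorem index_getD (w : String) (l : List (String × List (String × List String)))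
    (d : PySem.Dict String (PySem.Set String)) :
    (l.foldl (fun idx e =>
        (tokens_py e).foldl
          (fun ix t => PySem.Dict.modify ix t [] (fun s => PySem.Set.add s e.1)) idx) d).getD w []
      = (l.filter (fun e => decide (w ∈ tokens_py e))).foldl
          (fun s e => PySem.Set.add s e.1) (d.getD w []) := by
  induction l generalizing d with
  | nil => simp
  | cons e l ih =>
    rw [List.foldl_cons, ih, tokfold_getD]
    by_cases hw : w ∈ tokens_py e <;> simp [hw]

theorem mem_tokens_iff (w : String) (e : String × List (String × List String)) :
    w ∈ tokens_py e ↔ match_cond w e = true := by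
  unfold tokens_py match_cond
  simp only [show pre_repo_name = repo_name_alt_py from rfl]
  simp only [PySem.List.foldl_append_singleton_eq_map]
  simp only [List.mem_append, List.mem_singleton, List.mem_map, Bool.or_eq_true, beq_iff_eq,
    List.any_eq_true]
  constructor
  · rintro ((rfl | ⟨al, hal, rfl⟩) | rfl)
    · exact Or.inl (Or.inl rfl)
    · exact Or.inl (Or.inr ⟨al, hal, rfl⟩)
    · exact Or.inr rfl
  · rintro ((rfl | ⟨al, hal, rfl⟩) | rfl)
    · exact Or.inl (Or.inl rfl)
    · exact Or.inl (Or.inr ⟨al, hal, rfl⟩)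
    · exact Or.inr rfl

theorem foldl_add_fst (l : List (String × List (String × List String))) (s : PySem.Set String)
    (hnd : (l.map (·.1)).Nodup) (hout : ∀ e ∈ l, s.contains e.1 = false) :
    l.foldl (fun s e => PySem.Set.add s e.1) s = s ++ l.map (·.1) := by
  induction l generalizing s with
  | nil => simp
  | cons e l ih =>
    rw [List.foldl_cons]
    have hadd : PySem.Set.add s e.1 = s ++ [e.1] := by
      unfold PySem.Set.add PySem.Set.contains
      have := hout e List.mem_cons_self
      unfold PySem.Set.contains at this
      simp only [this]
      simp at this
      simp
    rw [hadd, ih (s ++ [e.1]) (List.nodup_cons.1 hnd).2]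
    · simp
    · intro x hx
      unfold PySem.Set.contains
      have h1 := hout x (List.mem_cons_of_mem _ hx)
      unfold PySem.Set.contains at h1
      simp at h1 ⊢
      refine ⟨h1, ?_⟩
      intro hEq
      exact (List.nodup_cons.1 hnd).1 (List.mem_map.2 ⟨x, hx, hEq⟩)

-- ===== VERDICT (by name: the statement is the Claim_ definition above) =====
theorem lookup_dep_py_spec : Claim_equal_lookup_dep_py := by
  intro dep_map raw_id _ hpre
  obtain ⟨hnd, hdis⟩ := hpre
  unfold Spec_lookup_dep_py lookup_dep_py lookup_dep_py_alt
  cases hc : (PySem.Dict.mk dep_map).contains raw_id with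
  | true => simp only [hc, if_true]
  | false =>
    simp only [hc, Bool.false_eq_true, if_false, PySem.Dict.size]
    rw [matchesA_eq, List.nil_append,
      byid_items (PySem.Str.lower raw_id) dep_map PySem.Dict.empty hnd
        (fun e _ => PySem.Dict.contains_empty e.1),
      index_getD]
    have hflt : dep_map.filter (fun e => decide (PySem.Str.lower raw_id ∈ tokens_py e))
        = dep_map.filter (match_cond (PySem.Str.lower raw_id)) := by
      refine List.filter_congr (fun e _ => ?_)
      by_cases h : PySem.Str.lower raw_id ∈ tokens_py e
      · simp [h, (mem_tokens_iff _ e).1 h]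
      · have : match_cond (PySem.Str.lower raw_id) e = false := by
          cases hm : match_cond (PySem.Str.lower raw_id) e
          · rfl
          · exact absurd ((mem_tokens_iff _ e).2 hm) h
        simp [h, this]
    rw [hflt]
    have hmlnd : ((dep_map.filter (match_cond (PySem.Str.lower raw_id))).map (·.1)).Nodup :=
      hnd.sublist (List.Sublist.map _ List.filter_sublist)
    rw [foldl_add_fst _ _ hmlnd (fun e _ => by simp [PySem.Set.contains, PySem.Dict.getD_empty])]
    simp only [PySem.Dict.getD_empty, List.nil_append]
    have hml2 : (dep_map.filter (match_cond (PySem.Str.lower raw_id))).length ≤ 1 := by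
      rcases hdis with h | h
      · exfalso
        have : (PySem.Dict.mk dep_map).contains raw_id = true := by
          rw [PySem.Dict.contains_iff_mem_keys]
          simpa [PySem.Dict.keys] using h
        simp [this] at hc
      · simpa [match_keys] using h
    rcases hml : dep_map.filter (match_cond (PySem.Str.lower raw_id)) with _ | ⟨e, _ | ⟨e2, rest⟩⟩
    · simp [PySem.Dict.empty]
    · have he : e ∈ dep_map := List.mem_of_mem_filter (hml ▸ List.mem_cons_self)
      have hg : (PySem.Dict.mk dep_map).get? e.1 = some e.2 := by
        apply PySem.Dict.get?_of_mem_items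
        · exact he
        · simpa [PySem.Dict.keys] using hnd
      simp [PySem.Dict.empty, hg]
    · rw [hml] at hml2
      simp at hml2
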